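-- pv_equiv track=rewrite | github.com/seungyeonseong/Python_PS | Baekjoon1744.py | func
-- ===== SOURCE A (Python) =====
-- def func(li):
--     #양수/음수로 나누기
--     minus=[]
--     plus=[]
--     total = 0
--     li.sort()
--     for i in li:
--         if i <0:
--             minus.append(i)
--         elif i>0:
--             plus.append(i)
--     #음수개수가 짝수면
--     if len(minus)%2 ==0 and len(minus)>0:
--         for i in range(0,len(minus)-1,2):
--             total += minus[i]*minus[i+1]
--     elif len(minus)%2==1:#음수개수가 홀수이면
--         if 0 in li: #0이 있으면
--             minus.remove(minus[-1])
--             for i in range(0,len(minus)-1,2):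
--                 total += minus[i]*minus[i+1]
--         else:    #0이 없으면
--             for i in range(0,len(minus)-2,2):
--                  total += minus[i]*minus[i+1]
--             total += minus[-1]
--
--     plus.reverse()
--     #양수처리
--     while plus.count(1) >0:
--         total +=1
--         plus.remove(1)
--     if len(plus)%2==0 and len(plus)>0:
--         for i in range(0,len(plus)-1,2):
--             total += plus[i]*plus[i+1]
--     elif len(plus)%2 ==1:
--         for i in range(0,len(plus)-2,2):
--             total += plus[i]*plus[i+1]
--         total += plus[-1]
--
--     return total
-- ===== SOURCE B (Python) =====
-- def func(li):
--     # One left-to-right sweep over the sorted list (A builds minus/plus lists and index-loops each).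
--     # Mutates li via in-place sort, like the original.
--     li.sort()
--     total = 0
--     n = len(li)
--     i = 0
--     # pair negatives from the most negative end
--     while i + 1 < n and li[i + 1] < 0:
--         total += li[i] * li[i + 1]
--         i += 2
--     if i < n and li[i] < 0:
--         # lone negative: absorbed by a zero if present, else added
--         if 0 not in li:
--             total += li[i]
--         i += 1
--     # skip zeros
--     while i < n and li[i] == 0:
--         i += 1
--     # each 1 contributes itself
--     while i < n and li[i] == 1:
--         total += 1
--         i += 1
--     # remaining are > 1: if odd count, the smallest stands alone
--     if (n - i) % 2 == 1:
--         total += li[i]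
--         i += 1
--     while i + 1 < n:
--         total += li[i] * li[i + 1]
--         i += 2
--     return total
-- ===== Notes on version B (the rewrite author's own statement) =====
-- stated objective: simpler
-- what changed: Replaces A's build-minus/plus-lists-then-index-loop-each (with a reverse and a count/remove loop for 1s) by a single left-to-right pointer sweep over the sorted list that pairs negatives, handles the lone negative/zero, counts ones, and pairs the remaining positives ascending (same pairs, opposite traversal order).
import Mathlib
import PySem

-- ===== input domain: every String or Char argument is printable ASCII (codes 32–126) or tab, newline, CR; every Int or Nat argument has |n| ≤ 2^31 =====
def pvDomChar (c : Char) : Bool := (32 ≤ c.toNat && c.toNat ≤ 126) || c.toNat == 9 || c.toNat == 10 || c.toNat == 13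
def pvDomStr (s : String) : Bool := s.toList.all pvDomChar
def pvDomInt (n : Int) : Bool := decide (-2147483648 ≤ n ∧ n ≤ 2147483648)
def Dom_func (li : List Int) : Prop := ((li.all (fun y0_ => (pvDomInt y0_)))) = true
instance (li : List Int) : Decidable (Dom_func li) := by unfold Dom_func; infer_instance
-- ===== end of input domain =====

-- B replaces A's build-minus/plus-lists-then-index-loop-each by a single left-to-right
-- pointer sweep over the sorted list (same return value; both sort the argument in place,
-- so the observable mutation is identical; the equivalence proved is about the return value).

-- ===== PORT A =====

-- while plus.count(1) > 0: total += 1; plus.remove(1)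
def removeOnesLoop (p : List Int) (total : Int) : List Int × Int :=
  if h : 0 < PySem.List.count p 1 then
    -- plus.remove(1): 1 ∈ p here, so remove? is some; .getD [] is unreachable
    removeOnesLoop ((PySem.List.remove? p 1).getD []) (total + 1)
  else (p, total)
termination_by p.length
decreasing_by
  have h1 : (1 : Int) ∈ p := List.count_pos_iff.mp (by
    simpa [PySem.List.count_eq] using h)
  rw [PySem.List.remove?_eq_some_erase p 1 h1]
  simp [List.length_erase_of_mem h1]
  exact List.length_pos_iff.mpr (by rintro rfl; simp at h1)

-- everything A does after li.sort(); s is the sorted list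
def funcCore (s : List Int) : Int :=
  let mp := s.foldl (fun (mp : List Int × List Int) x =>
      if x < 0 then (mp.1 ++ [x], mp.2)
      else if x > 0 then (mp.1, mp.2 ++ [x]) else mp) ([], [])
  let minus := mp.1
  let plus := mp.2
  let total : Int := 0
  let total :=
    if minus.length % 2 = 0 ∧ minus.length > 0 then
      (PySem.List.pyRange 0 ((minus.length : Int) - 1) 2).foldl
        (fun tot i => tot + PySem.List.pyGetD minus i 0 * PySem.List.pyGetD minus (i + 1) 0) total
    else if minus.length % 2 = 1 then
      if (0 : Int) ∈ s then
        let minus' := (PySem.List.remove? minus (PySem.List.pyGetD minus (-1) 0)).getD []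
        (PySem.List.pyRange 0 ((minus'.length : Int) - 1) 2).foldl
          (fun tot i => tot + PySem.List.pyGetD minus' i 0 * PySem.List.pyGetD minus' (i + 1) 0) total
      else
        ((PySem.List.pyRange 0 ((minus.length : Int) - 2) 2).foldl
          (fun tot i => tot + PySem.List.pyGetD minus i 0 * PySem.List.pyGetD minus (i + 1) 0) total)
        + PySem.List.pyGetD minus (-1) 0
    else total
  let plusR := plus.reverse
  let pt := removeOnesLoop plusR total
  let plus2 := pt.1
  let total := pt.2
  if plus2.length % 2 = 0 ∧ plus2.length > 0 then
    (PySem.List.pyRange 0 ((plus2.length : Int) - 1) 2).foldl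
      (fun tot i => tot + PySem.List.pyGetD plus2 i 0 * PySem.List.pyGetD plus2 (i + 1) 0) total
  else if plus2.length % 2 = 1 then
    ((PySem.List.pyRange 0 ((plus2.length : Int) - 2) 2).foldl
      (fun tot i => tot + PySem.List.pyGetD plus2 i 0 * PySem.List.pyGetD plus2 (i + 1) 0) total)
    + PySem.List.pyGetD plus2 (-1) 0
  else total

def func (li : List Int) : Int :=
  funcCore (PySem.List.sorted li (fun x => x))

-- ===== PORT B =====

-- while i + 1 < n and li[i+1] < 0: total += li[i]*li[i+1]; i += 2
def bNegLoop (s : List Int) (i : Nat) (total : Int) : Nat × Int :=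
  if _h : i + 1 < s.length ∧ s.getD (i + 1) 0 < 0 then
    bNegLoop s (i + 2) (total + s.getD i 0 * s.getD (i + 1) 0)
  else (i, total)
termination_by s.length - i
decreasing_by omega

-- while i < n and li[i] == 0: i += 1
def bSkipZeros (s : List Int) (i : Nat) : Nat :=
  if h : i < s.length ∧ s.getD i 0 = 0 then bSkipZeros s (i + 1) else i
termination_by s.length - i
decreasing_by omega

-- while i < n and li[i] == 1: total += 1; i += 1
def bOnes (s : List Int) (i : Nat) (total : Int) : Nat × Int :=
  if h : i < s.length ∧ s.getD i 0 = 1 then bOnes s (i + 1) (total + 1) else (i, total)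
termination_by s.length - i
decreasing_by omega

-- while i + 1 < n: total += li[i]*li[i+1]; i += 2
def bPairLoop (s : List Int) (i : Nat) (total : Int) : Int :=
  if _h : i + 1 < s.length then bPairLoop s (i + 2) (total + s.getD i 0 * s.getD (i + 1) 0)
  else total
termination_by s.length - i
decreasing_by omega

-- everything B does after li.sort(); s is the sorted list
def altCore (s : List Int) : Int :=
  let n := s.length
  let p1 := bNegLoop s 0 0
  let p2 := if p1.1 < n ∧ s.getD p1.1 0 < 0 then
      (p1.1 + 1, if (0 : Int) ∈ s then p1.2 else p1.2 + s.getD p1.1 0)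
    else p1
  let i2 := bSkipZeros s p2.1
  let p3 := bOnes s i2 p2.2
  let p4 := if (n - p3.1) % 2 = 1 then (p3.1 + 1, p3.2 + s.getD p3.1 0) else p3
  bPairLoop s p4.1 p4.2

def func_alt (li : List Int) : Int :=
  altCore (PySem.List.sorted li (fun x => x))

-- ===== PRECONDITION & SPEC =====
def Spec_func (li : List Int) (out : Int) : Prop := out = func_alt li
instance (li : List Int) (out : Int) : Decidable (Spec_func li out) := by unfold Spec_func; infer_instance

-- ===== CLAIM (what is proved, stated in full; the proofs are below) =====
def Claim_equal_func : Prop := ∀ (li : List Int), Dom_func li → Spec_func li (func li)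

-- ===== LEMMAS AND PROOFS =====

-- sum of products of consecutive pairs (a lone trailing element is ignored)
def pairSum : List Int → Int
  | a :: b :: t => a * b + pairSum t
  | _ => 0

-- how many elements B's negative loop consumes / what it adds, on a suffix
def negCons : List Int → Nat
  | _ :: b :: t => if b < 0 then negCons t + 2 else 0
  | _ => 0

def negSum : List Int → Int
  | a :: b :: t => if b < 0 then a * b + negSum t else 0
  | _ => 0

def zc : List Int → Nat
  | a :: t => if a = 0 then zc t + 1 else 0
  | _ => 0

def oc : List Int → Nat
  | a :: t => if a = 1 then oc t + 1 else 0
  | _ => 0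

lemma splitLoop_eq (l : List Int) : ∀ (m p : List Int),
    l.foldl (fun (mp : List Int × List Int) x =>
      if x < 0 then (mp.1 ++ [x], mp.2)
      else if x > 0 then (mp.1, mp.2 ++ [x]) else mp) (m, p)
    = (m ++ l.filter (fun x => decide (x < 0)), p ++ l.filter (fun x => decide (0 < x))) := by
  induction l with
  | nil => simp
  | cons a t ih =>
    intro m p
    simp only [List.foldl_cons, List.filter_cons]
    by_cases h1 : a < 0
    · simp [h1, ih, show ¬ (0 < a) by omega]
    · by_cases h2 : 0 < a
      · simp [h1, h2, ih]
      · simp [h1, h2, ih]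


lemma rangePair : ∀ (m : List Int) (t0 : Int),
    (List.range (m.length / 2)).foldl
      (fun tot j => tot + m.getD (2 * j) 0 * m.getD (2 * j + 1) 0) t0 = t0 + pairSum m
  | [], t0 => by simp [pairSum]
  | [a], t0 => by simp [pairSum]
  | a :: b :: t, t0 => by
    have ih := rangePair t (t0 + a * b)
    have hlen : (a :: b :: t).length / 2 = t.length / 2 + 1 := by simp; omega
    rw [hlen, List.range_succ_eq_map, List.foldl_cons, List.foldl_map]
    simp only [show ∀ j : Nat, 2 * (j + 1) = 2 * j + 1 + 1 from by omega,
      List.getD_cons_succ, Nat.mul_zero, List.getD_cons_zero]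
    rw [ih]
    simp [pairSum]; ring


lemma foldl_pairRange (m : List Int) (t0 : Int) :
    (PySem.List.pyRange 0 ((2 * (m.length / 2) : Nat) - 1 : Int) 2).foldl
      (fun tot i => tot + PySem.List.pyGetD m i 0 * PySem.List.pyGetD m (i + 1) 0) t0
    = t0 + pairSum m := by
  rw [PySem.List.pyRange_of_pos _ _ (by norm_num)]
  have hcnt : (if (0:Int) < (2 * (m.length / 2) : Nat) - 1 then
      ((((2 * (m.length / 2) : Nat) : Int) - 1 - 0 + 2 - 1) / 2).toNat else 0) = m.length / 2 := by
    by_cases h : 0 < m.length / 2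
    · rw [if_pos (by push_cast; omega)]
      have : (((2 * (m.length / 2) : Nat) : Int) - 1 - 0 + 2 - 1) = 2 * (m.length / 2 : Nat) := by
        push_cast; ring
      rw [this]
      omega
    · rw [if_neg (by push_cast; omega)]
      omega
  rw [hcnt, List.foldl_map]
  have : ∀ (tot : Int) (j : Nat), tot + PySem.List.pyGetD m (0 + 2 * (j:Int)) 0 * PySem.List.pyGetD m ((0 + 2 * (j:Int)) + 1) 0
      = tot + m.getD (2*j) 0 * m.getD (2*j+1) 0 := by
    intro tot j
    have h1 : (0 + 2 * (j:Int)) = ((2*j : Nat) : Int) := by push_cast; ring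
    have h2 : ((2*j : Nat) : Int) + 1 = ((2*j+1 : Nat) : Int) := by push_cast; ring
    rw [h1, h2, PySem.List.pyGetD_natCast, PySem.List.pyGetD_natCast]
  simp only [this]
  exact rangePair m t0


lemma pairSum_append_even : ∀ (xs : List Int), xs.length % 2 = 0 → ∀ ys,
    pairSum (xs ++ ys) = pairSum xs + pairSum ys
  | [], _, ys => by simp [pairSum]
  | [a], h, ys => by simp at h
  | a :: b :: t, h, ys => by
    have ih := pairSum_append_even t (by simp at h; omega) ys
    simp [pairSum, ih]; ring


lemma pairSum_dropLast_odd : ∀ (l : List Int), l.length % 2 = 1 →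
    pairSum l.dropLast = pairSum l
  | [], h => by simp at h
  | [a], _ => by simp [pairSum]
  | a :: b :: t, h => by
    have ih := pairSum_dropLast_odd t (by simp at h; omega)
    have ht : t ≠ [] := by intro he; rw [he] at h; simp at h
    rw [List.dropLast_cons₂]
    have : (b :: t).dropLast = b :: t.dropLast := by
      cases t with
      | nil => simp at ht
      | cons c u => simp [List.dropLast_cons₂]
    rw [this]
    simp [pairSum, ih]


lemma pairSum_reverse_even : ∀ (l : List Int), l.length % 2 = 0 →
    pairSum l.reverse = pairSum l
  | [], _ => by simp
  | [a], h => by simp at h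
  | a :: b :: t, h => by
    have ih := pairSum_reverse_even t (by simp at h; omega)
    have : (a :: b :: t).reverse = t.reverse ++ [b, a] := by simp
    rw [this, pairSum_append_even t.reverse (by have := h; simp at this ⊢; omega)]
    simp [pairSum, ih]; ring


lemma pairSum_reverse_odd (l : List Int) (h : l.length % 2 = 1) :
    pairSum l.reverse = pairSum (l.drop 1) := by
  cases l with
  | nil => simp at h
  | cons a t =>
    have ht : t.length % 2 = 0 := by simp at h; omega
    have : (a :: t).reverse = t.reverse ++ [a] := by simp
    rw [this]
    have he : pairSum (t.reverse ++ [a]) = pairSum t.reverse + pairSum [a] :=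
      pairSum_append_even t.reverse (by simp; omega) [a]
    rw [he, pairSum_reverse_even t ht]
    simp [pairSum]


lemma le_getLast_of_pairwise : ∀ (l : List Int) (hl : l ≠ []), l.Pairwise (· ≤ ·) →
    ∀ x ∈ l, x ≤ l.getLast hl
  | [], hl, _ => absurd rfl hl
  | [a], _, _ => by simp
  | a :: b :: t, _, hs => by
    intro x hx
    have ih := le_getLast_of_pairwise (b :: t) (by simp)
      (List.pairwise_cons.mp hs).2
    have hgl : (a :: b :: t).getLast (by simp) = (b :: t).getLast (by simp) := by
      simp [List.getLast]
    rw [hgl]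
    rcases List.mem_cons.mp hx with rfl | hx2
    · exact le_trans ((List.pairwise_cons.mp hs).1 _ (List.getLast_mem _)) (le_refl _)
    · exact ih x hx2


lemma erase_getLast_sorted : ∀ (l : List Int) (hl : l ≠ []), l.Pairwise (· ≤ ·) →
    l.erase (l.getLast hl) = l.dropLast
  | [], hl, _ => absurd rfl hl
  | [a], _, _ => by simp
  | a :: b :: t, _, hs => by
    have ih := erase_getLast_sorted (b :: t) (by simp) (List.pairwise_cons.mp hs).2
    have hgl : (a :: b :: t).getLast (by simp) = (b :: t).getLast (by simp) := by
      simp [List.getLast]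
    rw [hgl]
    by_cases hab : a = (b :: t).getLast (by simp)
    · have hle : ∀ x ∈ b :: t, a ≤ x := (List.pairwise_cons.mp hs).1
      have hmax : ∀ x ∈ b :: t, x ≤ (b :: t).getLast (by simp) :=
        le_getLast_of_pairwise (b :: t) (by simp) (List.pairwise_cons.mp hs).2
      have hall : ∀ x ∈ b :: t, x = a := by
        intro x hx
        have h1 := hle x hx
        have h2 := hmax x hx
        omega
      have hrep : b :: t = List.replicate (t.length + 1) a := by
        rw [List.eq_replicate_iff]
        exact ⟨by simp, hall⟩
      rw [← hab, List.erase_cons_head]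
      have : a :: b :: t = List.replicate (t.length + 2) a := by
        rw [show t.length + 2 = t.length + 1 + 1 from rfl, List.replicate_succ, ← hrep]
      rw [show (a :: b :: t).dropLast = (List.replicate (t.length + 2) a).dropLast from by rw [← this]]
      rw [List.dropLast_replicate]
      simpa using hrep
    · rw [List.erase_cons_tail (by simpa using hab), ih]
      cases t <;> simp


lemma filter_ne_erase_one (p : List Int) :
    (p.erase 1).filter (fun x => decide (x ≠ 1)) = p.filter (fun x => decide (x ≠ 1)) := by
  induction p with
  | nil => simp
  | cons a t ih =>
    by_cases ha : a = 1
    · subst ha; simp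
    · rw [List.erase_cons_tail (by simpa using ha)]
      simp only [List.filter_cons, show (decide (a ≠ 1)) = true from by simpa using ha]
      rw [ih]


lemma removeOnesLoop_eq (p : List Int) (t : Int) :
    removeOnesLoop p t = (p.filter (fun x => decide (x ≠ 1)), t + (p.count 1 : Int)) := by
  induction p, t using removeOnesLoop.induct with
  | case1 p t h ih =>
    have h1 : (1 : Int) ∈ p := List.count_pos_iff.mp (by simpa [PySem.List.count_eq] using h)
    rw [removeOnesLoop, dif_pos h]
    rw [PySem.List.remove?_eq_some_erase p 1 h1] at ih ⊢
    simp only [Option.getD_some] at ih ⊢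
    rw [ih, Prod.mk.injEq]
    have hc : 0 < List.count 1 p := List.count_pos_iff.mpr h1
    refine ⟨filter_ne_erase_one p, ?_⟩
    rw [List.count_erase_self]
    omega
  | case2 p t h =>
    rw [removeOnesLoop, dif_neg h]
    have h0 : List.count 1 p = 0 := by
      rw [PySem.List.count_eq] at h; omega
    have hnm : (1 : Int) ∉ p := by
      intro hx
      exact absurd (List.count_pos_iff.mpr hx) (by omega)
    have : p.filter (fun x => decide (x ≠ 1)) = p := by
      rw [List.filter_eq_self]
      intro x hx
      simp only [ne_eq, decide_not, Bool.not_eq_true', decide_eq_false_iff_not]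
      intro he
      exact hnm (by rwa [he] at hx)
    rw [this, h0]
    simp


lemma bNegLoop_eq (s : List Int) : ∀ (i : Nat) (total : Int),
    bNegLoop s i total = (i + negCons (s.drop i), total + negSum (s.drop i)) := by
  intro i total
  induction i, total using bNegLoop.induct (s := s) with
  | case1 i total h ih =>
    rw [bNegLoop, dif_pos h]
    obtain ⟨hlt, hneg⟩ := h
    have hi : i < s.length := by omega
    have hd1 : s.drop i = s[i] :: s.drop (i + 1) := List.drop_eq_getElem_cons hi
    have hd2 : s.drop (i + 1) = s[i+1] :: s.drop (i + 2) := List.drop_eq_getElem_cons hlt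
    have hg1 : s.getD i 0 = s[i] := List.getD_eq_getElem s 0 hi
    have hg2 : s.getD (i+1) 0 = s[i+1] := List.getD_eq_getElem s 0 hlt
    rw [ih]
    rw [hd1, hd2]
    simp only [negCons, negSum, hg1, hg2]
    rw [if_pos (by rwa [hg2] at hneg), if_pos (by rwa [hg2] at hneg), Prod.mk.injEq]
    exact ⟨by omega, by ring⟩
  | case2 i total h =>
    rw [bNegLoop, dif_neg h]
    have : negCons (s.drop i) = 0 ∧ negSum (s.drop i) = 0 := by
      by_cases hlt : i + 1 < s.length
      · have hi : i < s.length := by omega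
        have hd1 : s.drop i = s[i] :: s.drop (i + 1) := List.drop_eq_getElem_cons hi
        have hd2 : s.drop (i + 1) = s[i+1] :: s.drop (i + 2) := List.drop_eq_getElem_cons hlt
        have hge : ¬ s.getD (i+1) 0 < 0 := fun hc => h ⟨hlt, hc⟩
        rw [List.getD_eq_getElem s 0 hlt] at hge
        rw [hd1, hd2]
        simp [negCons, negSum, hge]
      · have : (s.drop i).length ≤ 1 := by simp [List.length_drop]; omega
        match hm : s.drop i, this with
        | [], _ => simp [negCons, negSum]
        | [a], _ => simp [negCons, negSum]
    rw [this.1, this.2]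
    simp


lemma bSkipZeros_eq (s : List Int) : ∀ i : Nat, bSkipZeros s i = i + zc (s.drop i) := by
  intro i
  induction i using bSkipZeros.induct (s := s) with
  | case1 i h ih =>
    obtain ⟨hi, hz⟩ := h
    rw [bSkipZeros, dif_pos ⟨hi, hz⟩, ih]
    have hd : s.drop i = s[i] :: s.drop (i + 1) := List.drop_eq_getElem_cons hi
    rw [List.getD_eq_getElem s 0 hi] at hz
    rw [hd]
    simp only [zc, if_pos hz]
    omega
  | case2 i h =>
    rw [bSkipZeros, dif_neg h]
    by_cases hi : i < s.length
    · have hd : s.drop i = s[i] :: s.drop (i + 1) := List.drop_eq_getElem_cons hi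
      have hz : ¬ s.getD i 0 = 0 := fun hc => h ⟨hi, hc⟩
      rw [List.getD_eq_getElem s 0 hi] at hz
      rw [hd]
      simp [zc, hz]
    · rw [List.drop_eq_nil_of_le (by omega)]
      simp [zc]


lemma bOnes_eq (s : List Int) : ∀ (i : Nat) (total : Int),
    bOnes s i total = (i + oc (s.drop i), total + (oc (s.drop i) : Int)) := by
  intro i total
  induction i, total using bOnes.induct (s := s) with
  | case1 i total h ih =>
    obtain ⟨hi, hz⟩ := h
    rw [bOnes, dif_pos ⟨hi, hz⟩, ih]
    have hd : s.drop i = s[i] :: s.drop (i + 1) := List.drop_eq_getElem_cons hi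
    rw [List.getD_eq_getElem s 0 hi] at hz
    rw [hd]
    simp only [oc, if_pos hz, Prod.mk.injEq]
    exact ⟨by omega, by push_cast; ring⟩
  | case2 i total h =>
    rw [bOnes, dif_neg h]
    by_cases hi : i < s.length
    · have hd : s.drop i = s[i] :: s.drop (i + 1) := List.drop_eq_getElem_cons hi
      have hz : ¬ s.getD i 0 = 1 := fun hc => h ⟨hi, hc⟩
      rw [List.getD_eq_getElem s 0 hi] at hz
      rw [hd]
      simp [oc, hz]
    · rw [List.drop_eq_nil_of_le (by omega)]
      simp [oc]


lemma bPairLoop_eq (s : List Int) : ∀ (i : Nat) (total : Int),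
    bPairLoop s i total = total + pairSum (s.drop i) := by
  intro i total
  induction i, total using bPairLoop.induct (s := s) with
  | case1 i total h ih =>
    rw [bPairLoop, dif_pos h, ih]
    have hi : i < s.length := by omega
    have hd1 : s.drop i = s[i] :: s.drop (i + 1) := List.drop_eq_getElem_cons hi
    have hd2 : s.drop (i + 1) = s[i+1] :: s.drop (i + 2) := List.drop_eq_getElem_cons h
    rw [hd1, hd2]
    simp only [pairSum, List.getD_eq_getElem s 0 hi, List.getD_eq_getElem s 0 h]
    ring
  | case2 i total h =>
    rw [bPairLoop, dif_neg h]
    have : (s.drop i).length ≤ 1 := by simp [List.length_drop]; omega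
    match hm : s.drop i, this with
    | [], _ => simp [pairSum]
    | [a], _ => simp [pairSum]


lemma negScan : ∀ (N : List Int), (∀ x ∈ N, x < 0) → ∀ (rest : List Int), (∀ x ∈ rest, 0 ≤ x) →
    negCons (N ++ rest) = 2 * (N.length / 2) ∧ negSum (N ++ rest) = pairSum N
  | [], _, rest, hrest => by
    match rest, hrest with
    | [], _ => simp [negCons, negSum, pairSum]
    | [a], _ => simp [negCons, negSum, pairSum]
    | a :: b :: t, hr =>
      have hb : ¬ (b < 0) := by have := hr b (by simp); omega
      simp [negCons, negSum, pairSum, hb]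
  | [a], ha, rest, hrest => by
    match rest, hrest with
    | [], _ => simp [negCons, negSum, pairSum]
    | b :: t, hr =>
      have hb : ¬ (b < 0) := by have := hr b (by simp); omega
      simp [negCons, negSum, pairSum, hb]
  | a :: b :: N', h, rest, hrest => by
    have ih := negScan N' (fun x hx => h x (by simp [hx])) rest hrest
    have hb : b < 0 := h b (by simp)
    simp only [List.cons_append, negCons, negSum, pairSum, if_pos hb]
    refine ⟨?_, ?_⟩
    · rw [ih.1]; simp; omega
    · rw [ih.2]


lemma zcScan : ∀ (Z : List Int), (∀ x ∈ Z, x = 0) → ∀ (rest : List Int), (∀ x ∈ rest, x ≠ 0) →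
    zc (Z ++ rest) = Z.length
  | [], _, rest, hrest => by
    match rest, hrest with
    | [], _ => simp [zc]
    | a :: t, hr => simp [zc, hr a (by simp)]
  | a :: Z', h, rest, hrest => by
    have ih := zcScan Z' (fun x hx => h x (by simp [hx])) rest hrest
    simp only [List.cons_append, zc, if_pos (h a (by simp))]
    rw [ih]; simp


lemma ocScan : ∀ (O : List Int), (∀ x ∈ O, x = 1) → ∀ (rest : List Int), (∀ x ∈ rest, x ≠ 1) →
    oc (O ++ rest) = O.length
  | [], _, rest, hrest => by
    match rest, hrest with
    | [], _ => simp [oc]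
    | a :: t, hr => simp [oc, hr a (by simp)]
  | a :: O', h, rest, hrest => by
    have ih := ocScan O' (fun x hx => h x (by simp [hx])) rest hrest
    simp only [List.cons_append, oc, if_pos (h a (by simp))]
    rw [ih]; simp


lemma sorted_decomp : ∀ (s : List Int), s.Pairwise (· ≤ ·) →
    s = s.filter (fun x => decide (x < 0)) ++ s.filter (fun x => decide (x = 0))
      ++ s.filter (fun x => decide (x = 1)) ++ s.filter (fun x => decide (1 < x)) := by
  intro s hs
  induction s with
  | nil => simp
  | cons a t ih =>
    obtain ⟨hle, hp⟩ := List.pairwise_cons.mp hs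
    have iht := ih hp
    have hcase : a < 0 ∨ a = 0 ∨ a = 1 ∨ 1 < a := by omega
    simp only [List.filter_cons]
    rcases hcase with h | h | h | h
    · simp only [show decide (a < 0) = true from by simpa using h,
        show decide (a = 0) = false from by simp; omega,
        show decide (a = 1) = false from by simp; omega,
        show decide (1 < a) = false from by simp; omega]
      simpa using iht
    · have hN : t.filter (fun x => decide (x < 0)) = [] := by
        rw [List.filter_eq_nil_iff]
        intro x hx
        have := hle x hx
        simp; omega
      simp only [show decide (a < 0) = false from by simp; omega,
        show decide (a = 0) = true from by simpa using h,
        show decide (a = 1) = false from by simp; omega,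
        show decide (1 < a) = false from by simp; omega, hN]
      rw [hN] at iht
      simpa using iht
    · have hN : t.filter (fun x => decide (x < 0)) = [] := by
        rw [List.filter_eq_nil_iff]; intro x hx; have := hle x hx; simp; omega
      have hZ : t.filter (fun x => decide (x = 0)) = [] := by
        rw [List.filter_eq_nil_iff]; intro x hx; have := hle x hx; simp; omega
      simp only [show decide (a < 0) = false from by simp; omega,
        show decide (a = 0) = false from by simp; omega,
        show decide (a = 1) = true from by simpa using h,
        show decide (1 < a) = false from by simp; omega, hN, hZ]
      rw [hN, hZ] at iht
      simpa using iht
    · have hN : t.filter (fun x => decide (x < 0)) = [] := by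
        rw [List.filter_eq_nil_iff]; intro x hx; have := hle x hx; simp; omega
      have hZ : t.filter (fun x => decide (x = 0)) = [] := by
        rw [List.filter_eq_nil_iff]; intro x hx; have := hle x hx; simp; omega
      have hO : t.filter (fun x => decide (x = 1)) = [] := by
        rw [List.filter_eq_nil_iff]; intro x hx; have := hle x hx; simp; omega
      simp only [show decide (a < 0) = false from by simp; omega,
        show decide (a = 0) = false from by simp; omega,
        show decide (a = 1) = false from by simp; omega,
        show decide (1 < a) = true from by simpa using h, hN, hZ, hO]
      rw [hN, hZ, hO] at iht
      simpa using iht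


lemma funcCore_val (N Z O P : List Int)
    (hN : ∀ x ∈ N, x < 0) (hZ : ∀ x ∈ Z, x = 0) (hO : ∀ x ∈ O, x = 1) (hP : ∀ x ∈ P, 1 < x)
    (hNs : N.Pairwise (· ≤ ·)) :
    funcCore (N ++ Z ++ O ++ P) =
      (pairSum N + (if N.length % 2 = 1 ∧ (0 : Int) ∉ (N ++ Z ++ O ++ P) then N.getD (N.length - 1) 0 else 0))
      + (O.length : Int)
      + (if P.length % 2 = 0 then pairSum P else pairSum (P.drop 1) + P.getD 0 0) := by
  have hfN : (N ++ Z ++ O ++ P).filter (fun x => decide (x < 0)) = N := by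
    simp only [List.filter_append]
    rw [List.filter_eq_self.mpr (by intro x hx; simpa using hN x hx),
      List.filter_eq_nil_iff.mpr (by intro x hx; have := hZ x hx; simp; omega),
      List.filter_eq_nil_iff.mpr (by intro x hx; have := hO x hx; simp; omega),
      List.filter_eq_nil_iff.mpr (by intro x hx; have := hP x hx; simp; omega)]
    simp
  have hfOP : (N ++ Z ++ O ++ P).filter (fun x => decide (x > 0)) = O ++ P := by
    simp only [List.filter_append]
    rw [List.filter_eq_nil_iff.mpr (by intro x hx; have := hN x hx; simp; omega),
      List.filter_eq_nil_iff.mpr (by intro x hx; have := hZ x hx; simp; omega),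
      List.filter_eq_self.mpr (by intro x hx; have := hO x hx; simp; omega),
      List.filter_eq_self.mpr (by intro x hx; have := hP x hx; simp; omega)]
    simp
  unfold funcCore
  rw [splitLoop_eq, List.nil_append, List.nil_append, hfN, hfOP]
  dsimp only
  rw [List.reverse_append]
  rw [removeOnesLoop_eq]
  have hcount : List.count 1 (P.reverse ++ O.reverse) = O.length := by
    rw [List.count_append,
      List.count_eq_zero.mpr (by simp only [List.mem_reverse]; intro hx; have := hP 1 hx; omega),
      List.count_eq_length.mpr (by simp only [List.mem_reverse]; intro b hb; exact (hO b hb).symm)]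
    simp
  have hfilter : (P.reverse ++ O.reverse).filter (fun x => decide (x ≠ 1)) = P.reverse := by
    rw [List.filter_append,
      List.filter_eq_self.mpr (by simp only [List.mem_reverse]; intro x hx; have := hP x hx; simp; omega),
      List.filter_eq_nil_iff.mpr (by simp only [List.mem_reverse]; intro x hx; have := hO x hx; simp; omega)]
    simp
  rw [hcount, hfilter]
  dsimp only
  -- the negative part
  have hnegval : (if N.length % 2 = 0 ∧ N.length > 0 then
      (PySem.List.pyRange 0 ((N.length : Int) - 1) 2).foldl
        (fun tot i => tot + PySem.List.pyGetD N i 0 * PySem.List.pyGetD N (i + 1) 0) 0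
    else if N.length % 2 = 1 then
      if (0 : Int) ∈ N ++ Z ++ O ++ P then
        ((PySem.List.pyRange 0 ((((PySem.List.remove? N (PySem.List.pyGetD N (-1) 0)).getD []).length : Int) - 1) 2).foldl
          (fun tot i => tot + PySem.List.pyGetD ((PySem.List.remove? N (PySem.List.pyGetD N (-1) 0)).getD []) i 0
            * PySem.List.pyGetD ((PySem.List.remove? N (PySem.List.pyGetD N (-1) 0)).getD []) (i + 1) 0) 0)
      else
        ((PySem.List.pyRange 0 ((N.length : Int) - 2) 2).foldl
          (fun tot i => tot + PySem.List.pyGetD N i 0 * PySem.List.pyGetD N (i + 1) 0) 0)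
        + PySem.List.pyGetD N (-1) 0
    else 0)
    = pairSum N + (if N.length % 2 = 1 ∧ (0 : Int) ∉ (N ++ Z ++ O ++ P) then N.getD (N.length - 1) 0 else 0) := by
    by_cases hpar : N.length % 2 = 0
    · rw [if_neg (show ¬(N.length % 2 = 1 ∧ (0 : Int) ∉ (N ++ Z ++ O ++ P)) from by rintro ⟨h1, _⟩; omega)]
      by_cases hN0 : N.length > 0
      · rw [if_pos (show N.length % 2 = 0 ∧ N.length > 0 from ⟨hpar, hN0⟩),
          show ((N.length : Int) - 1) = (((2 * (N.length / 2) : Nat) : Int) - 1) from by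
            rw [show (2 * (N.length / 2) : Nat) = N.length from by omega],
          foldl_pairRange]
        ring
      · rw [if_neg (show ¬(N.length % 2 = 0 ∧ N.length > 0) from by rintro ⟨_, h1⟩; omega),
          if_neg (show ¬(N.length % 2 = 1) from by omega)]
        have : N = [] := List.length_eq_zero_iff.mp (by omega)
        rw [this]
        simp [pairSum]
    · have hodd : N.length % 2 = 1 := by omega
      have hne : N ≠ [] := by intro he; rw [he] at hodd; simp at hodd
      rw [if_neg (show ¬(N.length % 2 = 0 ∧ N.length > 0) from by rintro ⟨h1, _⟩; omega), if_pos hodd]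
      have hglval : N.getD (N.length - 1) 0 = N.getLast hne := by
        rw [List.getD_eq_getElem _ _ (by have := List.length_pos_iff.mpr hne; omega),
          List.getLast_eq_getElem]
      by_cases h0 : (0 : Int) ∈ N ++ Z ++ O ++ P
      · rw [if_pos h0, if_neg (show ¬(N.length % 2 = 1 ∧ (0 : Int) ∉ (N ++ Z ++ O ++ P)) from by
            rintro ⟨_, hc0⟩; exact hc0 h0)]
        rw [PySem.List.pyGetD_neg_one N 0 hne,
          PySem.List.remove?_eq_some_erase N _ (List.getLast_mem hne)]
        dsimp only [Option.getD_some]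
        rw [erase_getLast_sorted N hne hNs]
        rw [show ((N.dropLast.length : Int) - 1) = (((2 * (N.dropLast.length / 2) : Nat) : Int) - 1) from by
            rw [show (2 * (N.dropLast.length / 2) : Nat) = N.dropLast.length from by
              simp only [List.length_dropLast]; omega],
          foldl_pairRange, pairSum_dropLast_odd N hodd]
        ring
      · rw [if_neg h0, if_pos (show N.length % 2 = 1 ∧ (0 : Int) ∉ (N ++ Z ++ O ++ P) from ⟨hodd, h0⟩)]
        rw [PySem.List.pyGetD_neg_one N 0 hne,
          show ((N.length : Int) - 2) = (((2 * (N.length / 2) : Nat) : Int) - 1) from by omega,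
          foldl_pairRange, hglval]
        ring
  rw [hnegval]
  -- the positive part, on P.reverse
  have hlenrev : P.reverse.length = P.length := List.length_reverse
  by_cases hppar : P.length % 2 = 0
  · by_cases hP0 : 0 < P.length
    · rw [if_pos (show P.reverse.length % 2 = 0 ∧ P.reverse.length > 0 from
          ⟨by rw [hlenrev]; exact hppar, by rw [hlenrev]; exact hP0⟩),
        show ((P.reverse.length : Int) - 1) = (((2 * (P.reverse.length / 2) : Nat) : Int) - 1) from by
          rw [show (2 * (P.reverse.length / 2) : Nat) = P.reverse.length from by rw [hlenrev]; omega],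
        foldl_pairRange, pairSum_reverse_even P hppar, if_pos hppar]
    · rw [if_neg (show ¬(P.reverse.length % 2 = 0 ∧ P.reverse.length > 0) from by
          rw [hlenrev]; rintro ⟨_, h1⟩; omega),
        if_neg (show ¬(P.reverse.length % 2 = 1) from by rw [hlenrev]; omega), if_pos hppar]
      have : P = [] := List.length_eq_zero_iff.mp (by omega)
      rw [this]
      simp [pairSum]
  · have hodd : P.length % 2 = 1 := by omega
    have hne : P ≠ [] := by intro he; rw [he] at hodd; simp at hodd
    have hnerev : P.reverse ≠ [] := by simpa using hne
    rw [if_neg (show ¬(P.reverse.length % 2 = 0 ∧ P.reverse.length > 0) from by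
        rw [hlenrev]; rintro ⟨h1, _⟩; omega),
      if_pos (show P.reverse.length % 2 = 1 from by rw [hlenrev]; exact hodd),
      show ((P.reverse.length : Int) - 2) = (((2 * (P.reverse.length / 2) : Nat) : Int) - 1) from by
        rw [hlenrev]; omega,
      foldl_pairRange, pairSum_reverse_odd P hodd,
      PySem.List.pyGetD_neg_one P.reverse 0 hnerev, if_neg hppar]
    have hlastrev : P.reverse.getLast hnerev = P.getD 0 0 := by
      cases P with
      | nil => exact absurd rfl hne
      | cons p t =>
        rw [List.getLast_eq_getElem]
        simp
    rw [hlastrev]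
    ring

lemma getD_append_right' (l1 l2 : List Int) (n : Nat) (h : l1.length ≤ n) :
    (l1 ++ l2).getD n 0 = l2.getD (n - l1.length) 0 := by
  rcases Nat.lt_or_ge n (l1.length + l2.length) with hlt | hge
  · rw [List.getD_eq_getElem _ _ (by simp; omega), List.getD_eq_getElem _ _ (by omega),
      List.getElem_append_right h]
  · rw [List.getD_eq_default _ _ (by simp; omega), List.getD_eq_default _ _ (by omega)]

lemma altCore_val (N Z O P : List Int)
    (hN : ∀ x ∈ N, x < 0) (hZ : ∀ x ∈ Z, x = 0) (hO : ∀ x ∈ O, x = 1) (hP : ∀ x ∈ P, 1 < x) :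
    altCore (N ++ Z ++ O ++ P) =
      (pairSum N + (if N.length % 2 = 1 ∧ (0 : Int) ∉ (N ++ Z ++ O ++ P) then N.getD (N.length - 1) 0 else 0))
      + (O.length : Int)
      + (if P.length % 2 = 0 then pairSum P else pairSum (P.drop 1) + P.getD 0 0) := by
  have hge : ∀ x ∈ Z ++ (O ++ P), 0 ≤ x := by
    intro x hx
    rcases List.mem_append.mp hx with h | h
    · exact le_of_eq (hZ x h).symm
    · rcases List.mem_append.mp h with h | h
      · have := hO x h; omega
      · have := hP x h; omega
  have hassoc : N ++ Z ++ O ++ P = N ++ (Z ++ (O ++ P)) := by simp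
  have hlen : (N ++ Z ++ O ++ P).length = N.length + Z.length + O.length + P.length := by simp; omega
  obtain ⟨hc, hsum⟩ := negScan N hN (Z ++ (O ++ P)) hge
  rw [← hassoc] at hc hsum
  have hdropNZO : (N ++ Z ++ O ++ P).drop (N.length + Z.length + O.length) = P := by
    have h : N.length + Z.length + O.length = (N ++ Z ++ O).length := by simp; omega
    rw [h]
    exact List.drop_left
  have hzc : zc ((N ++ Z ++ O ++ P).drop N.length) = Z.length := by
    rw [show (N ++ Z ++ O ++ P).drop N.length = Z ++ (O ++ P) from by rw [hassoc]; exact List.drop_left]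
    exact zcScan Z hZ (O ++ P) (by
      intro x hx
      rcases List.mem_append.mp hx with h | h
      · rw [hO x h]; norm_num
      · have := hP x h; omega)
  have hoc : oc ((N ++ Z ++ O ++ P).drop (N.length + Z.length)) = O.length := by
    rw [show (N ++ Z ++ O ++ P).drop (N.length + Z.length) = O ++ P from by
      rw [show N.length + Z.length = (N ++ Z).length from by simp,
        show N ++ Z ++ O ++ P = (N ++ Z) ++ (O ++ P) from by simp]
      exact List.drop_left]
    exact ocScan O hO P (by intro x hx; have := hP x hx; omega)
  have hsub : (N ++ Z ++ O ++ P).length - (N.length + Z.length + O.length) = P.length := by omega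
  have hP0 : (N ++ Z ++ O ++ P).getD (N.length + Z.length + O.length) 0 = P.getD 0 0 := by
    rw [show N ++ Z ++ O ++ P = (N ++ Z ++ O) ++ P from by simp,
      getD_append_right' (N ++ Z ++ O) P _ (by simp; omega)]
    congr 1
    simp; omega
  have hdrop1 : (N ++ Z ++ O ++ P).drop (N.length + Z.length + O.length + 1) = P.drop 1 := by
    rw [← List.drop_drop, hdropNZO]
  unfold altCore
  rw [bNegLoop_eq, List.drop_zero, hc, hsum]
  dsimp only
  simp only [zero_add]
  by_cases hpar : N.length % 2 = 0
  · -- even number of negatives: no lone negative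
    have h2 : 2 * (N.length / 2) = N.length := by omega
    rw [h2]
    have hcond : ¬ (N.length < (N ++ Z ++ O ++ P).length ∧ (N ++ Z ++ O ++ P).getD N.length 0 < 0) := by
      rintro ⟨h1, h2'⟩
      rw [hassoc, getD_append_right' N (Z ++ (O ++ P)) N.length (le_refl _), Nat.sub_self] at h2'
      cases hr : Z ++ (O ++ P) with
      | nil =>
        rw [hassoc, hr] at h1
        simp at h1
      | cons a t =>
        rw [hr] at h2'
        simp [List.getD] at h2'
        have := hge a (by rw [hr]; simp)
        omega
    rw [if_neg hcond]
    dsimp only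
    rw [bSkipZeros_eq, hzc, bOnes_eq, hoc]
    dsimp only
    by_cases hppar : P.length % 2 = 0
    · rw [if_neg (by rw [hsub]; omega)]
      dsimp only
      rw [bPairLoop_eq, hdropNZO, if_pos hppar, if_neg (by rintro ⟨h1, _⟩; omega)]
      ring
    · rw [if_pos (by rw [hsub]; omega)]
      dsimp only
      rw [bPairLoop_eq, hP0, hdrop1, if_neg hppar, if_neg (by rintro ⟨h1, _⟩; omega)]
      ring
  · -- odd number of negatives: a lone negative remains
    have hNne : N ≠ [] := by intro he; rw [he] at hpar; simp at hpar
    have hnl1 : 0 < N.length := List.length_pos_iff.mpr hNne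
    have h2 : 2 * (N.length / 2) = N.length - 1 := by omega
    rw [h2]
    have hgl : (N ++ Z ++ O ++ P).getD (N.length - 1) 0 = N.getD (N.length - 1) 0 := by
      rw [hassoc]
      exact List.getD_append N _ 0 _ (by omega)
    have hglneg : N.getD (N.length - 1) 0 < 0 := by
      rw [List.getD_eq_getElem _ _ (by omega)]
      exact hN _ (List.getElem_mem _)
    rw [if_pos (show N.length - 1 < (N ++ Z ++ O ++ P).length ∧
        (N ++ Z ++ O ++ P).getD (N.length - 1) 0 < 0 from ⟨by rw [hlen]; omega, by rw [hgl]; exact hglneg⟩)]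
    dsimp only
    rw [show N.length - 1 + 1 = N.length from by omega, bSkipZeros_eq, hzc, bOnes_eq, hoc]
    dsimp only
    have hiteN : (if (0:Int) ∈ N ++ Z ++ O ++ P then pairSum N
        else pairSum N + (N ++ Z ++ O ++ P).getD (N.length - 1) 0)
        = pairSum N + (if N.length % 2 = 1 ∧ (0 : Int) ∉ (N ++ Z ++ O ++ P) then N.getD (N.length - 1) 0 else 0) := by
      by_cases h0 : (0:Int) ∈ N ++ Z ++ O ++ P
      · rw [if_pos h0, if_neg (by rintro ⟨_, hc0⟩; exact hc0 h0)]
        exact (add_zero _).symm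
      · rw [if_neg h0, if_pos ⟨by omega, h0⟩, hgl]
    by_cases hppar : P.length % 2 = 0
    · rw [if_neg (by rw [hsub]; omega)]
      dsimp only
      rw [bPairLoop_eq, hdropNZO, if_pos hppar, hiteN]
    · rw [if_pos (by rw [hsub]; omega)]
      dsimp only
      rw [bPairLoop_eq, hP0, hdrop1, if_neg hppar, hiteN]
      ring

lemma core_eq (N Z O P : List Int)
    (hN : ∀ x ∈ N, x < 0) (hZ : ∀ x ∈ Z, x = 0) (hO : ∀ x ∈ O, x = 1) (hP : ∀ x ∈ P, 1 < x)
    (hNs : N.Pairwise (· ≤ ·)) :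
    funcCore (N ++ Z ++ O ++ P) = altCore (N ++ Z ++ O ++ P) := by
  rw [funcCore_val N Z O P hN hZ hO hP hNs, altCore_val N Z O P hN hZ hO hP]

-- ===== VERDICT (by name: the statement is the Claim_ definition above) =====
theorem func_spec : Claim_equal_func := by
  intro li _
  unfold Spec_func func func_alt
  have hs := PySem.List.sorted_pairwise li (fun x => x)
  set s := PySem.List.sorted li (fun x => x) with hsdef
  have hdec := sorted_decomp s hs
  rw [hdec]
  exact core_eq _ _ _ _
    (fun x hx => by simpa using (List.of_mem_filter hx))
    (fun x hx => by simpa using (List.of_mem_filter hx))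
    (fun x hx => by simpa using (List.of_mem_filter hx))
    (fun x hx => by simpa using (List.of_mem_filter hx))
    (hs.filter _)
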